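-- pv_equiv track=rewrite | github.com/hlzhang109/prescriptive-scaling | prescriptive_eval/skill_frontier/io/csv_utils.py | detect_date_col_flexible
-- ===== SOURCE A (Python) =====
-- from typing import List, Optional, Sequence, Tuple
--
-- def detect_date_col_flexible(headers: Sequence[str]) -> Optional[str]:
--     """Detect a date column using flexible heuristics.
--
--     Args:
--         headers: List of column names
--
--     Returns:
--         Name of the date column if found, None otherwise
--     """
--     if "Upload To Hub Date" in headers:
--         return "Upload To Hub Date"
--     if "Submission Date" in headers:
--         return "Submission Date"
--     for col in headers:
--         col_lower = col.lower()
--         if "date" in col_lower or "submission" in col_lower: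
--             return col
--     return None
-- ===== SOURCE B (Python) =====
-- def detect_date_col_flexible(headers):
--     """Detect a date column using flexible heuristics (single ranked pass)."""
--     best = None  # (rank, name): rank 1 = exact "Submission Date", rank 2 = first substring match
--     for col in headers:
--         if col == "Upload To Hub Date":
--             return "Upload To Hub Date"
--         if col == "Submission Date":
--             if best is None or best[0] > 1:
--                 best = (1, col)
--         elif best is None:
--             cl = col.lower()
--             if "date" in cl or "submission" in cl:
--                 best = (2, col)
--     return best[1] if best is not None else None
-- ===== Notes on version B (the rewrite author's own statement) =====
-- stated objective: alternative
-- what changed: Replaces A's three separate scans (two full membership tests plus a substring loop) with one pass that keeps a ranked best-candidate and returns early on the top-priority name.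
import Mathlib
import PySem

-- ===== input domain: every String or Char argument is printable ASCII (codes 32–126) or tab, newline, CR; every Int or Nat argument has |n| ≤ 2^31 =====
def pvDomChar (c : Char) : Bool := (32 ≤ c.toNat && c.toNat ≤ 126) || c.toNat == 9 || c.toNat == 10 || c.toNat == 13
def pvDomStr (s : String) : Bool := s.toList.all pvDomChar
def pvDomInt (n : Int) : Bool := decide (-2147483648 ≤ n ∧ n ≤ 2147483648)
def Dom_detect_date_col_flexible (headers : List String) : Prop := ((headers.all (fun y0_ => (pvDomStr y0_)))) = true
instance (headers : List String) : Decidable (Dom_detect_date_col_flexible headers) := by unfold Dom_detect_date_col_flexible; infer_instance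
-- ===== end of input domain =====

-- B folds A's three scans into one ranked pass; objective: single pass instead of three scans (alternative decomposition).
-- ===== PORT A =====
def detect_date_col_flexible_loopA : List String → Option String
  | [] => none
  | col :: rest =>
    let col_lower := PySem.Str.lower col
    if PySem.Str.isIn "date" col_lower || PySem.Str.isIn "submission" col_lower then some col
    else detect_date_col_flexible_loopA rest

def detect_date_col_flexible (headers : List String) : Option String :=
  if headers.contains "Upload To Hub Date" then some "Upload To Hub Date"
  else if headers.contains "Submission Date" then some "Submission Date"
  else detect_date_col_flexible_loopA headers

-- ===== PORT B =====
def detect_date_col_flexible_loopB : List String → Option (Nat × String) → Option String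
  | [], best => best.map Prod.snd
  | col :: rest, best =>
    if col = "Upload To Hub Date" then some "Upload To Hub Date"
    else if col = "Submission Date" then
      detect_date_col_flexible_loopB rest
        (match best with
         | none => some (1, col)
         | some (r, _) => if r > 1 then some (1, col) else best)
    else
      match best with
      | none =>
        let cl := PySem.Str.lower col
        if PySem.Str.isIn "date" cl || PySem.Str.isIn "submission" cl then
          detect_date_col_flexible_loopB rest (some (2, col))
        else detect_date_col_flexible_loopB rest none
      | some _ => detect_date_col_flexible_loopB rest best

def detect_date_col_flexible_alt (headers : List String) : Option String :=
  detect_date_col_flexible_loopB headers none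

-- ===== PRECONDITION & SPEC =====
def Spec_detect_date_col_flexible (headers : List String) (out : Option String) : Prop := out = detect_date_col_flexible_alt headers
instance (headers : List String) (out : Option String) : Decidable (Spec_detect_date_col_flexible headers out) := by unfold Spec_detect_date_col_flexible; infer_instance

-- ===== CLAIM (what is proved, stated in full; the proofs are below) =====
def Claim_equal_detect_date_col_flexible : Prop := ∀ (headers : List String), Dom_detect_date_col_flexible headers → Spec_detect_date_col_flexible headers (detect_date_col_flexible headers)

-- ===== LEMMAS AND PROOFS =====

-- loopB from a rank-1 state: only a later "Upload To Hub Date" can override s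
theorem loopB_rank1 (hs : List String) (s : String) :
    detect_date_col_flexible_loopB hs (some (1, s)) =
      if hs.contains "Upload To Hub Date" then some "Upload To Hub Date" else some s := by
  induction hs with
  | nil => simp [detect_date_col_flexible_loopB]
  | cons c rest ih =>
    by_cases hU : c = "Upload To Hub Date"
    · simp [detect_date_col_flexible_loopB, hU]
    · by_cases hS : c = "Submission Date"
      · simp [detect_date_col_flexible_loopB, hS, ih]
      · simp [detect_date_col_flexible_loopB, hU, hS, Ne.symm hU, ih]

-- loopB from a rank-2 state: "Upload To Hub Date" then "Submission Date" still beat the fallback x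
theorem loopB_rank2 (hs : List String) (x : String) :
    detect_date_col_flexible_loopB hs (some (2, x)) =
      if hs.contains "Upload To Hub Date" then some "Upload To Hub Date"
      else if hs.contains "Submission Date" then some "Submission Date"
      else some x := by
  induction hs with
  | nil => simp [detect_date_col_flexible_loopB]
  | cons c rest ih =>
    by_cases hU : c = "Upload To Hub Date"
    · simp [detect_date_col_flexible_loopB, hU]
    · by_cases hS : c = "Submission Date"
      · simp [detect_date_col_flexible_loopB, hS, loopB_rank1]
      · simp [detect_date_col_flexible_loopB, hU, hS, Ne.symm hU, Ne.symm hS, ih]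

theorem loopB_none (hs : List String) :
    detect_date_col_flexible_loopB hs none = detect_date_col_flexible hs := by
  induction hs with
  | nil => simp [detect_date_col_flexible_loopB, detect_date_col_flexible,
      detect_date_col_flexible_loopA]
  | cons c rest ih =>
    by_cases hU : c = "Upload To Hub Date"
    · simp [detect_date_col_flexible_loopB, detect_date_col_flexible, hU]
    · by_cases hS : c = "Submission Date"
      · simp [detect_date_col_flexible_loopB, detect_date_col_flexible, hS, loopB_rank1]
      · by_cases hm : (PySem.Str.isIn "date" (PySem.Str.lower c)
            || PySem.Str.isIn "submission" (PySem.Str.lower c)) = true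
        all_goals simp only [Bool.not_eq_true] at hm
        all_goals simp [PySem.Str.isIn, PySem.Str.lower] at hm
        · simp [detect_date_col_flexible_loopB, detect_date_col_flexible,
            detect_date_col_flexible_loopA, hU, hS, Ne.symm hU, Ne.symm hS, hm, loopB_rank2]
        · simp [detect_date_col_flexible_loopB, detect_date_col_flexible,
            detect_date_col_flexible_loopA, hU, hS, Ne.symm hU, Ne.symm hS, hm, ih]

-- ===== VERDICT =====
theorem detect_date_col_flexible_spec : Claim_equal_detect_date_col_flexible := by
  intro headers _
  unfold Spec_detect_date_col_flexible detect_date_col_flexible_alt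
  exact (loopB_none headers).symm
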